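-- pv_equiv track=rewrite | github.com/michalbaldyga/personality-type-prediction-ops | backend/train/train.py | calculate_coins_indexes
-- ===== SOURCE A (Python) =====
-- VALUES_PER_COIN = 2
--
-- def calculate_coins_indexes(coin_col):
--     coins_indexes = []
--     changes_cnt = 0
--     curr_coin = coin_col[0]
--     for idx, coin in enumerate(coin_col):
--         if coin != curr_coin:
--             curr_coin = coin
--             changes_cnt += 1
--         if changes_cnt == VALUES_PER_COIN:
--             coins_indexes.append(idx)
--             changes_cnt = 0
--     coins_indexes.append(idx + 1)
--     return coins_indexes
-- ===== SOURCE B (Python) =====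
-- def calculate_coins_indexes(coin_col):
--     changes = [i for i in range(1, len(coin_col)) if coin_col[i] != coin_col[i - 1]]
--     return changes[1::2] + [len(coin_col)]
-- ===== Notes on version B (the rewrite author's own statement) =====
-- stated objective: simpler
-- what changed: Replaces the stateful counter loop (changes_cnt, curr_coin, reset-on-2) with a comprehension of adjacent change points followed by the slice changes[1::2] plus the final len(coin_col).
-- crash fix: On the empty list A raises IndexError (it reads coin_col[0]); B returns [0]. — e.g. on calculate_coins_indexes([]): A raises IndexError, B returns [0]
import Mathlib
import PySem

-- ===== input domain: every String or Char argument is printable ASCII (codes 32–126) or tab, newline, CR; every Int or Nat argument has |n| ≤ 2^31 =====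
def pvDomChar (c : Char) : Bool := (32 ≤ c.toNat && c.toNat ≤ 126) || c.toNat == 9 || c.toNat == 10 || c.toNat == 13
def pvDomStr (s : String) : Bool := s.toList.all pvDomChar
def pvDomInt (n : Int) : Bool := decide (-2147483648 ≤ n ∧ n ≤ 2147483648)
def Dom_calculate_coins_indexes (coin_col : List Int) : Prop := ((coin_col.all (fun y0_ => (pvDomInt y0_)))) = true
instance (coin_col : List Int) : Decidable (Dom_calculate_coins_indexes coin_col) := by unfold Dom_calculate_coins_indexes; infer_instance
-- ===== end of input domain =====

-- B replaces A's stateful counter loop (changes_cnt/curr_coin, reset on 2) with a change-point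
-- comprehension followed by the slice changes[1::2]; objective: simpler.

-- ===== PORT A =====
-- A-side helper: the body of A's for-loop; state = (coins_indexes, changes_cnt, curr_coin, idx).
def pvStepA (s : List Int × Int × Int × Int) (p : Int × Int) : List Int × Int × Int × Int :=
  let acc := s.1
  let cnt := s.2.1
  let curr := s.2.2.1
  let idx := p.1
  let coin := p.2
  let cc := if coin ≠ curr then (cnt + 1, coin) else (cnt, curr)
  if cc.1 = 2 then (acc ++ [idx], 0, cc.2, idx) else (acc, cc.1, cc.2, idx)

def calculate_coins_indexes (coin_col : List Int) : List Int :=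
  match PySem.List.pyGet? coin_col 0 with
  | none => []  -- coin_col[0] raises IndexError on []; excluded by Pre_
  | some curr_coin =>
    let st := (PySem.List.enumerate coin_col 0).foldl pvStepA ([], 0, curr_coin, 0)
    st.1 ++ [st.2.2.2 + 1]

-- ===== PORT B =====
def calculate_coins_indexes_alt (coin_col : List Int) : List Int :=
  let changes := (PySem.List.pyRange 1 (PySem.List.len coin_col) 1).filter
    (fun i => decide (PySem.List.pyGetD coin_col i 0 ≠ PySem.List.pyGetD coin_col (i - 1) 0))
  (PySem.List.slice? changes (some 1) none 2).getD [] ++ [PySem.List.len coin_col]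

-- ===== PRECONDITION & SPEC =====
-- A reads coin_col[0] before the loop, so it raises IndexError exactly on the empty list.
def Pre_calculate_coins_indexes (coin_col : List Int) : Prop := coin_col ≠ []
instance (coin_col : List Int) : Decidable (Pre_calculate_coins_indexes coin_col) := by unfold Pre_calculate_coins_indexes; infer_instance
def pvWitness_calculate_coins_indexes : List Int := [1, 1, 2, 2, 3, 3]

-- On the empty list A raises IndexError (it reads coin_col[0]); B returns [0].
def Raises_calculate_coins_indexes (coin_col : List Int) : Prop := coin_col = []
instance (coin_col : List Int) : Decidable (Raises_calculate_coins_indexes coin_col) := by unfold Raises_calculate_coins_indexes; infer_instance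
def pvRaiseWitness_calculate_coins_indexes : List Int := []
def pvRaiseWitnessOut_calculate_coins_indexes : List Int := [0]

def Spec_calculate_coins_indexes (coin_col : List Int) (out : List Int) : Prop := out = calculate_coins_indexes_alt coin_col
instance (coin_col : List Int) (out : List Int) : Decidable (Spec_calculate_coins_indexes coin_col out) := by unfold Spec_calculate_coins_indexes; infer_instance

-- ===== CLAIM (what is proved, stated in full; the proofs are below) =====
def Claim_equal_calculate_coins_indexes : Prop := ∀ (coin_col : List Int), Dom_calculate_coins_indexes coin_col → Pre_calculate_coins_indexes coin_col → Spec_calculate_coins_indexes coin_col (calculate_coins_indexes coin_col)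
def Claim_raises_calculate_coins_indexes : Prop := (∀ (coin_col : List Int), Dom_calculate_coins_indexes coin_col → Raises_calculate_coins_indexes coin_col → ¬ Pre_calculate_coins_indexes coin_col) ∧ (Dom_calculate_coins_indexes (pvRaiseWitness_calculate_coins_indexes) ∧ Raises_calculate_coins_indexes (pvRaiseWitness_calculate_coins_indexes) ∧ calculate_coins_indexes_alt (pvRaiseWitness_calculate_coins_indexes) = pvRaiseWitnessOut_calculate_coins_indexes)

-- ===== LEMMAS AND PROOFS =====

-- every second element (indices 1, 3, 5, …), i.e. Python's l[1::2]
def oddIdx : List Int → List Int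
  | [] => []
  | [_] => []
  | _ :: b :: t => b :: oddIdx t

-- B's change-point list, as a named abbreviation for the proofs
def chs (xs : List Int) : List Int :=
  (PySem.List.pyRange 1 (PySem.List.len xs) 1).filter
    (fun i => decide (PySem.List.pyGetD xs i 0 ≠ PySem.List.pyGetD xs (i - 1) 0))

lemma filterMap_odd : ∀ (xs : List Int), (List.range (xs.length / 2)).filterMap (fun k => xs[1 + 2 * k]?) = oddIdx xs := by
  intro xs
  induction xs using oddIdx.induct with
  | case1 => simp [oddIdx]
  | case2 a => simp [oddIdx]
  | case3 a b t ih =>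
    have hl : (a :: b :: t).length / 2 = t.length / 2 + 1 := by simp; omega
    rw [hl, List.range_succ_eq_map, List.filterMap_cons, List.filterMap_map]
    have hf : ((fun k => (a :: b :: t)[1 + 2 * k]?) ∘ Nat.succ) = (fun k => t[1 + 2 * k]?) := by
      funext k
      show (a :: b :: t)[1 + 2 * (k + 1)]? = t[1 + 2 * k]?
      rw [show 1 + 2 * (k + 1) = (1 + 2 * k) + 1 + 1 by omega]
      simp
    rw [hf, ih]
    simp [oddIdx]

lemma slice?_one_two (xs : List Int) : PySem.List.slice? xs (some 1) none 2 = some (oddIdx xs) := by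
  cases xs with
  | nil => rfl
  | cons a l =>
    unfold PySem.List.slice? PySem.List.sliceIndices
    have hn : (1:Int) ≤ ((a :: l).length : Int) := by simp
    simp only [if_neg (by norm_num : ¬ (2:Int) = 0), if_neg (by norm_num : ¬ (2:Int) < 0),
      if_neg (by norm_num : ¬ (1:Int) < 0), if_pos (by norm_num : (0:Int) < 2), min_eq_left hn]
    have hcnt : (if (1:Int) < ((a :: l).length : Int) then ((((a :: l).length : Int) - 1 + 2 - 1) / 2).toNat else 0)
        = (a :: l).length / 2 := by split_ifs with h <;> omega
    rw [hcnt]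
    have hf : (fun (x : Nat) => (a :: l)[((1:Int) + 2 * (x : Int)).toNat]?) = (fun x => (a :: l)[1 + 2 * x]?) := by
      funext k
      congr 1
    rw [hf, filterMap_odd]

lemma oddIdx_append (l : List Int) (x : Int) :
    oddIdx (l ++ [x]) = if l.length % 2 = 1 then oddIdx l ++ [x] else oddIdx l := by
  induction l using oddIdx.induct with
  | case1 => simp [oddIdx]
  | case2 a => simp [oddIdx]
  | case3 a b t ih =>
    simp only [List.cons_append, oddIdx, ih, List.length_cons]
    rw [show (t.length + 1 + 1) % 2 = t.length % 2 by omega]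
    split_ifs <;> simp

lemma chs_append (xs : List Int) (x : Int) (h : xs ≠ []) :
    chs (xs ++ [x]) = chs xs ++ (if x ≠ xs.getLastD 0 then [(xs.length : Int)] else []) := by
  have hlen : 1 ≤ xs.length := List.length_pos_iff.mpr h
  unfold chs
  simp only [PySem.List.len_eq, List.length_append, List.length_cons, List.length_nil]
  rw [show ((xs.length + (0 + 1) : Nat) : Int) = (xs.length : Int) + 1 by push_cast; ring]
  rw [PySem.List.pyRange_one_succ_right (by exact_mod_cast hlen)]
  rw [List.filter_append]
  congr 1
  · apply List.filter_congr
    intro i hi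
    rw [PySem.List.mem_pyRange_one] at hi
    have h1 : PySem.List.pyGetD (xs ++ [x]) i 0 = PySem.List.pyGetD xs i 0 := by
      rw [PySem.List.pyGetD_eq_getElem (xs ++ [x]) 0 (by omega) (by simp; omega),
          PySem.List.pyGetD_eq_getElem xs 0 (by omega) (by omega)]
      exact List.getElem_append_left (by omega)
    have h2 : PySem.List.pyGetD (xs ++ [x]) (i - 1) 0 = PySem.List.pyGetD xs (i - 1) 0 := by
      rw [PySem.List.pyGetD_eq_getElem (xs ++ [x]) 0 (by omega) (by simp; omega),
          PySem.List.pyGetD_eq_getElem xs 0 (by omega) (by omega)]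
      exact List.getElem_append_left (by omega)
    rw [h1, h2]
  · have h1 : PySem.List.pyGetD (xs ++ [x]) ((xs.length : Int)) 0 = x := by
      rw [PySem.List.pyGetD_eq_getElem (xs ++ [x]) 0 (by omega) (by simp)]
      simp
    have h2 : PySem.List.pyGetD (xs ++ [x]) ((xs.length : Int) - 1) 0 = xs.getLastD 0 := by
      rw [PySem.List.pyGetD_eq_getElem (xs ++ [x]) 0 (by omega)
            (by simp only [List.length_append, List.length_cons, List.length_nil]; push_cast; omega)]
      simp only [show ((xs.length : Int) - 1).toNat = xs.length - 1 from by omega]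
      rw [List.getElem_append_left (by omega)]
      rw [List.getLastD_eq_getLast?, List.getLast?_eq_getElem?, List.getElem?_eq_getElem (by omega)]
      rfl
    simp only [List.filter, h1, h2]
    split_ifs with hx <;> simp_all

lemma loopA (c0 : Int) (t : List Int) :
    (PySem.List.enumerate (c0 :: t) 0).foldl pvStepA ([], 0, c0, 0)
      = (oddIdx (chs (c0 :: t)), (((chs (c0 :: t)).length % 2 : Nat) : Int),
         (c0 :: t).getLastD 0, ((c0 :: t).length : Int) - 1) := by
  induction t using List.reverseRecOn with
  | nil =>
    have hchs : chs [c0] = [] := by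
      unfold chs
      rw [PySem.List.len_eq]
      rw [PySem.List.pyRange_one_eq_nil (by simp)]
      rfl
    simp [PySem.List.enumerate_cons, PySem.List.enumerate_nil, pvStepA, hchs, oddIdx]
  | append_singleton t x ih =>
    rw [show c0 :: (t ++ [x]) = (c0 :: t) ++ [x] from rfl]
    rw [PySem.List.enumerate_append]
    rw [show PySem.List.enumerate [x] (0 + (((c0 :: t).length : Nat) : Int)) = [((0 + (((c0 :: t).length : Nat) : Int)), x)]
          from by simp [PySem.List.enumerate_cons, PySem.List.enumerate_nil]]
    rw [List.foldl_append, ih]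
    rw [chs_append (c0 :: t) x (by simp)]
    simp only [List.foldl_cons, List.foldl_nil]
    have hlast : ∀ (y : Int), ((c0 :: (t ++ [y])).getLast?).getD 0 = y := fun y => by
      rw [← List.cons_append, List.getLast?_concat]
      rfl
    by_cases hx : x = (c0 :: t).getLastD 0
    · rw [if_neg (by simpa using hx), List.append_nil]
      simp only [pvStepA, hx, ne_eq, not_true_eq_false, if_false]
      have h2 : ¬ ((((chs (c0 :: t)).length % 2 : Nat) : Int) = 2) := by omega
      simp only [if_neg h2]
      refine Prod.ext ?_ (Prod.ext ?_ (Prod.ext ?_ ?_)) <;> simp [hlast, hx] <;> omega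
    · rw [if_pos (by simpa using hx)]
      rw [oddIdx_append]
      simp only [pvStepA, ne_eq, hx, not_false_iff, if_true, List.length_append,
        List.length_cons, List.length_nil]
      by_cases hp : (chs (c0 :: t)).length % 2 = 1
      · rw [if_pos hp]
        have h2 : (((chs (c0 :: t)).length % 2 : Nat) : Int) + 1 = 2 := by omega
        simp only [if_pos h2]
        refine Prod.ext ?_ (Prod.ext ?_ (Prod.ext ?_ ?_)) <;> simp [hlast] <;> omega
      · rw [if_neg hp]
        have h2 : ¬ ((((chs (c0 :: t)).length % 2 : Nat) : Int) + 1 = 2) := by omega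
        simp only [if_neg h2]
        refine Prod.ext ?_ (Prod.ext ?_ (Prod.ext ?_ ?_)) <;> simp [hlast] <;> omega

-- ===== VERDICT (by name: the statement is the Claim_ definition above) =====
theorem calculate_coins_indexes_spec : Claim_equal_calculate_coins_indexes := by
  intro coin_col _ hpre
  unfold Spec_calculate_coins_indexes
  cases coin_col with
  | nil => exact absurd rfl hpre
  | cons c0 t =>
    have hslice := slice?_one_two (chs (c0 :: t))
    show calculate_coins_indexes (c0 :: t)
        = (PySem.List.slice? (chs (c0 :: t)) (some 1) none 2).getD [] ++ [PySem.List.len (c0 :: t)]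
    rw [hslice]
    unfold calculate_coins_indexes
    rw [PySem.List.pyGet?_zero_cons]
    show (let st := (PySem.List.enumerate (c0 :: t) 0).foldl pvStepA ([], 0, c0, 0)
          st.1 ++ [st.2.2.2 + 1])
        = oddIdx (chs (c0 :: t)) ++ [PySem.List.len (c0 :: t)]
    rw [loopA]
    simp [PySem.List.len_eq]

@[simp] theorem calculate_coins_indexes_raises : Claim_raises_calculate_coins_indexes := by
  unfold Claim_raises_calculate_coins_indexes
  refine ⟨fun c _ hr => ?_, by decide⟩
  unfold Raises_calculate_coins_indexes at hr
  unfold Pre_calculate_coins_indexes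
  simp [hr]
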